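-- pv_equiv track=rewrite | github.com/Akande-o/CTU-FEE | PRG/GRADED HOMEWORKS/library.py | index_by_author
-- ===== SOURCE A (Python) =====
-- def index_by_author(book_dict):
--     """The function reads a dictionary of book titles as keys and book authors as values and
--     returns another dictionary with the book authors as keys and their books in a list as values.
--     Parameters:
--     book_dict:a dictionary where the book titles are used as keys and the authors' names are stored as values.
--     Returns:
--     book_index: a dictionary which stores the book authors as keys and a list of their books as values
--     """
--     book_index = {}                            # initialising the dictionary
--     for title, author in book_dict.items():    #extracting the book titles and book authors from the input dictionary
--         if author not in book_index:           # adding the authors as keys in the dictionary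
--             book_index[author] = [title]       # setting the values as a list of first book title in input dictionary
--         else:                                  # if author is in the dictionary
--             book_index[author].append(title)   # add the other titles into the list of book titles by the author
--     return book_index       # dictionary using the author as keys and a list of their book titles as values
-- ===== SOURCE B (Python) =====
-- def index_by_author(book_dict):
--     # B: collect distinct authors first (insertion order), then build each
--     # author's title list by a per-author filtering scan over the items.
--     authors = dict.fromkeys(book_dict.values())
--     return {author: [title for title, a in book_dict.items() if a == author]
--             for author in authors}
-- ===== Notes on version B (the rewrite author's own statement) =====
-- stated objective: alternative
-- what changed: Replaces the single accumulating dict-building pass with a two-phase scheme: first collect the distinct authors in order of first appearance, then build each author's title list by its own filtering scan over all items.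
import Mathlib
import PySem

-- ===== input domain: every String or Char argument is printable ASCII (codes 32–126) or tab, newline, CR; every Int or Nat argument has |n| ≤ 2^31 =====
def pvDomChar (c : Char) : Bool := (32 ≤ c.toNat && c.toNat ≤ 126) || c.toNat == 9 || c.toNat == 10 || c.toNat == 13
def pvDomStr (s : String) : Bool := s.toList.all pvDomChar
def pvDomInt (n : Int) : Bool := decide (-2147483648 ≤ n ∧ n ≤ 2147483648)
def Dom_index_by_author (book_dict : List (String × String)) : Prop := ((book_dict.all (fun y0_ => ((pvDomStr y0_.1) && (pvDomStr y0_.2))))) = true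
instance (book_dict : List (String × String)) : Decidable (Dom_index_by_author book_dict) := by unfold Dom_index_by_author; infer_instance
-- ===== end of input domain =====

-- ===== PORT A =====
-- Port of A: one left-to-right pass building an insertion-ordered dict; the returned
-- dict is its items list.
def index_by_author (book_dict : List (String × String)) : List (String × List String) :=
  (book_dict.foldl
    (fun d p =>
      if d.contains p.2 = false then d.insert p.2 [p.1]
      else d.modify p.2 [] (fun l => l ++ [p.1]))
    (PySem.Dict.empty : PySem.Dict String (List String))).items

-- ===== PORT B =====
-- Port of B: distinct authors first (dict.fromkeys = PySem.List.dedup), then a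
-- per-author filtering scan of the items.
def index_by_author_alt (book_dict : List (String × String)) : List (String × List String) :=
  (PySem.List.dedup (book_dict.map Prod.snd)).map
    (fun author => (author, (book_dict.filter (fun p => p.2 == author)).map Prod.fst))

-- ===== PRECONDITION & SPEC =====
def Spec_index_by_author (book_dict : List (String × String)) (out : List (String × List String)) : Prop := out = index_by_author_alt book_dict
instance (book_dict : List (String × String)) (out : List (String × List String)) : Decidable (Spec_index_by_author book_dict out) := by unfold Spec_index_by_author; infer_instance

-- ===== CLAIM (what is proved, stated in full; the proofs are below) =====
def Claim_equal_index_by_author : Prop := ∀ (book_dict : List (String × String)), Dom_index_by_author book_dict → Spec_index_by_author book_dict (index_by_author book_dict)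

-- ===== LEMMAS AND PROOFS =====

-- ===== VERDICT (by name: the statement is the Claim_ definition above) =====

-- A's branchy step is exactly 'modify author [] (append title)'.
lemma stepA_eq_modify (d : PySem.Dict String (List String)) (p : String × String) :
    (if d.contains p.2 = false then d.insert p.2 [p.1]
     else d.modify p.2 [] (fun l => l ++ [p.1]))
    = d.modify p.2 [] (fun l => l ++ [p.1]) := by
  have hmod : d.modify p.2 [] (fun l => l ++ [p.1])
      = d.insert p.2 (d.getD p.2 [] ++ [p.1]) := PySem.Dict.ext_iff.mpr rfl
  by_cases h : d.contains p.2 = false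
  · have hget : d.getD p.2 [] = [] := PySem.Dict.getD_of_not_contains (h := h) (d0 := [])
    simp [h, hmod, hget]
  · simp [h]

lemma foldA_eq_modify_swap (book_dict : List (String × String)) :
    book_dict.foldl
      (fun d p =>
        if d.contains p.2 = false then d.insert p.2 [p.1]
        else d.modify p.2 [] (fun l => l ++ [p.1]))
      (PySem.Dict.empty : PySem.Dict String (List String))
    = (book_dict.map Prod.swap).foldl
        (fun d q => d.modify q.1 [] (fun l => l ++ [q.2]))
        (PySem.Dict.empty : PySem.Dict String (List String)) := by
  rw [List.foldl_map]
  congr 1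
  funext d p
  exact stepA_eq_modify d p

theorem index_by_author_spec : Claim_equal_index_by_author := by
  intro book_dict _
  unfold Spec_index_by_author index_by_author index_by_author_alt
  rw [foldA_eq_modify_swap]
  set D := (book_dict.map Prod.swap).foldl
      (fun d q => d.modify q.1 [] (fun l => l ++ [q.2]))
      (PySem.Dict.empty : PySem.Dict String (List String)) with hD
  have hnd : D.keys.Nodup := by
    rw [hD]
    exact PySem.Dict.nodup_keys_foldl_modify_key _ _ _ _ _ PySem.Dict.nodup_keys_empty
  have hkeys : D.keys = PySem.List.dedup (book_dict.map Prod.snd) := by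
    rw [hD, PySem.Dict.keys_foldl_modify_key]
    simp [PySem.Dict.keys_empty, PySem.Set.update, PySem.List.dedup_eq_ofList,
      PySem.Set.ofList, List.map_map, Function.comp_def, Prod.swap]
  have hget : ∀ a : String,
      D.getD a [] = (book_dict.filter (fun p => p.2 == a)).map Prod.fst := by
    intro a
    rw [hD, PySem.Dict.getD_foldl_modify_append]
    simp [PySem.Dict.getD_empty, List.filter_map, List.map_map, Function.comp_def, Prod.swap]
  rw [PySem.Dict.items_eq_map_keys D hnd [], hkeys]
  apply List.map_congr_left
  intro a _
  rw [hget a]
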